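-- pv_equiv track=rewrite | github.com/bellatorioxd/votes_spmr | main.py | vidnosna_bilshist
-- ===== SOURCE A (Python) =====
-- list_of_candidates_start=["a", "b", "c", "d"]
--
-- def vidnosna_bilshist(array):
--     points = array[1][0]
--     list_of_candidates=array[1][1:]
--     res={}
--     for element in list_of_candidates_start:
--         res[element] = 0
--         i=0
--         for elem in list_of_candidates:
--                 if elem == element:
--                     res[element]+=array[0][i+1]
--                 i+=1
--     winner_value=max(res.values())
--     winner = list(res.keys())[list(res.values()).index(winner_value)]
--     return res, winner
-- ===== SOURCE B (Python) =====
-- list_of_candidates_start = ["a", "b", "c", "d"]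
--
-- def vidnosna_bilshist(array):
--     res = {c: 0 for c in list_of_candidates_start}
--     for i, name in enumerate(array[1][1:]):
--         if name in res:
--             res[name] += array[0][i + 1]
--     winner = max(res, key=res.get)
--     return res, winner
-- ===== Notes on version B (the rewrite author's own statement) =====
-- stated objective: faster
-- what changed: B replaces A's per-candidate rescan of the ballot list (one full pass per candidate, plus a fresh weight counter each time) with a single enumerate pass that adds each ballot's weight to a pre-initialised {a,b,c,d: 0} dict under a membership guard, and takes the winner as max(res, key=res.get).
-- crash fix: On an empty ballot list array[1], A raises IndexError at array[1][0] while B returns the all-zero tally {a:0,b:0,c:0,d:0} with winner 'a'. — e.g. on vidnosna_bilshist([], []): A raises IndexError, B returns ([("a", 0), ("b", 0), ("c", 0), ("d", 0)], "a")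
import Mathlib
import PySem

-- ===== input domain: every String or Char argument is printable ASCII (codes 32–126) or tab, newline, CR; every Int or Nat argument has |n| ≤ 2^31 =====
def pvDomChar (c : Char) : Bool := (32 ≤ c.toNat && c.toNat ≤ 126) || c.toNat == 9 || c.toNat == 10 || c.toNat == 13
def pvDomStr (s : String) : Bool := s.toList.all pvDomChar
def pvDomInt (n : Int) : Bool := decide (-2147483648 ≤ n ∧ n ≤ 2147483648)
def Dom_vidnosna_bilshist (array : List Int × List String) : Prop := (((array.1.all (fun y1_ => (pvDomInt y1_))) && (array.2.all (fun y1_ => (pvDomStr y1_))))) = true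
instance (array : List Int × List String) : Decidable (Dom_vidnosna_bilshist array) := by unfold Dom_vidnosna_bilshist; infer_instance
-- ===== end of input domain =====

-- B replaces A's candidate-by-candidate rescans of the ballot list with one dict built up in a
-- single enumerate pass (objective: faster, one pass instead of one scan per candidate).

-- ===== PORT A =====
def list_of_candidates_start : List String := ["a", "b", "c", "d"]

def vidnosna_bilshist (array : List Int × List String) : (List (String × Int)) × String :=
  let _points := PySem.List.pyGet? array.2 0
  let list_of_candidates := PySem.List.slice array.2 (some 1) none
  let res : PySem.Dict String Int := list_of_candidates_start.foldl
    (fun res element =>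
      let res := res.insert element 0
      let p := list_of_candidates.foldl
        (fun (p : PySem.Dict String Int × Int) elem =>
          ((if elem == element then p.1.modify element 0 (· + PySem.List.pyGetD array.1 (p.2 + 1) 0) else p.1), p.2 + 1))
        (res, (0 : Int))
      p.1)
    PySem.Dict.empty
  let winner_value := (PySem.List.max? res.values (fun v => v)).getD 0
  let winner := (PySem.List.pyGet? res.keys (((PySem.List.index? res.values winner_value).getD 0 : Nat) : Int)).getD ""
  (res.items, winner)

-- ===== PORT B =====
def vidnosna_bilshist_alt (array : List Int × List String) : (List (String × Int)) × String :=
  let res0 : PySem.Dict String Int := list_of_candidates_start.foldl (fun d c => d.insert c 0) PySem.Dict.empty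
  let res := (PySem.List.enumerate (PySem.List.slice array.2 (some 1) none) 0).foldl
    (fun d p => if d.contains p.2 then d.modify p.2 0 (· + PySem.List.pyGetD array.1 (p.1 + 1) 0) else d)
    res0
  let winner := (PySem.List.max? res.keys (fun k => res.getD k 0)).getD ""
  (res.items, winner)

-- ===== PRECONDITION & SPEC =====
-- Pre_ excludes exactly the inputs where the Python A raises IndexError: an empty ballot list
-- (array[1][0]) or a ballot naming a candidate at a position whose weight index is past the end of array[0].
def Pre_vidnosna_bilshist (array : List Int × List String) : Prop :=
  array.2 ≠ [] ∧ ∀ i : Nat, i < array.2.tail.length →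
    (array.2.tail.getD i "" ∈ list_of_candidates_start → i + 1 < array.1.length)
instance (array : List Int × List String) : Decidable (Pre_vidnosna_bilshist array) := by
  unfold Pre_vidnosna_bilshist; infer_instance

def pvWitness_vidnosna_bilshist : (List Int × List String) := ([0, 3], ["x", "a"])

-- On an empty ballot list array[1], A raises IndexError (array[1][0]) while B returns the all-zero
-- tally with winner "a".
def Raises_vidnosna_bilshist (array : List Int × List String) : Prop := array.2 = []
instance (array : List Int × List String) : Decidable (Raises_vidnosna_bilshist array) := by
  unfold Raises_vidnosna_bilshist; infer_instance
def pvRaiseWitness_vidnosna_bilshist : (List Int × List String) := ([], [])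
def pvRaiseWitnessOut_vidnosna_bilshist : (List (String × Int)) × String :=
  ([("a", 0), ("b", 0), ("c", 0), ("d", 0)], "a")

def Spec_vidnosna_bilshist (array : List Int × List String) (out : (List (String × Int)) × String) : Prop := out = vidnosna_bilshist_alt array
instance (array : List Int × List String) (out : (List (String × Int)) × String) : Decidable (Spec_vidnosna_bilshist array out) := by unfold Spec_vidnosna_bilshist; infer_instance

-- ===== CLAIM (what is proved, stated in full; the proofs are below) =====
def Claim_equal_vidnosna_bilshist : Prop := ∀ (array : List Int × List String), Dom_vidnosna_bilshist array → Pre_vidnosna_bilshist array → Spec_vidnosna_bilshist array (vidnosna_bilshist array)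

def Claim_raises_vidnosna_bilshist : Prop := (∀ (array : List Int × List String), Dom_vidnosna_bilshist array → Raises_vidnosna_bilshist array → ¬ Pre_vidnosna_bilshist array) ∧ (Dom_vidnosna_bilshist (pvRaiseWitness_vidnosna_bilshist) ∧ Raises_vidnosna_bilshist (pvRaiseWitness_vidnosna_bilshist) ∧ vidnosna_bilshist_alt (pvRaiseWitness_vidnosna_bilshist) = pvRaiseWitnessOut_vidnosna_bilshist)

-- ===== LEMMAS AND PROOFS =====

def wsum (f : Int → Int) (loc : List String) (c : String) (i : Int) : Int :=
  match loc with
  | [] => 0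
  | e :: t => (if e = c then f i else 0) + wsum f t c (i + 1)

lemma modify_last (pre : List (String × Int)) (c : String) (x : Int) (g : Int → Int)
    (hc : ∀ p ∈ pre, p.1 ≠ c) :
    (PySem.Dict.mk (pre ++ [(c, x)])).modify c 0 g = PySem.Dict.mk (pre ++ [(c, g x)]) := by
  induction pre with
  | nil => simp [PySem.Dict.modify, PySem.Dict.contains, PySem.Dict.getD, PySem.Dict.get?, PySem.Dict.insert]
  | cons h t ih =>
    simp_all [PySem.Dict.modify, PySem.Dict.contains, PySem.Dict.getD, PySem.Dict.get?, PySem.Dict.insert]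
    have h2 : ∀ p ∈ t, (if p.1 = c then ((c, g x) : String × ℤ) else p) = p := by
      intro p hp; rw [if_neg (hc.2 p.1 p.2 hp)]
    exact (List.map_congr_left h2).trans (List.map_id' t)

lemma A_inner (f : Int → Int) (loc : List String) (pre : List (String × Int)) (c : String) (x : Int) (i : Int)
    (hc : ∀ p ∈ pre, p.1 ≠ c) :
    loc.foldl
      (fun (p : PySem.Dict String Int × Int) elem =>
        ((if elem == c then p.1.modify c 0 (· + f p.2) else p.1), p.2 + 1))
      (PySem.Dict.mk (pre ++ [(c, x)]), i)
    = (PySem.Dict.mk (pre ++ [(c, x + wsum f loc c i)]), i + loc.length) := by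
  induction loc generalizing x i with
  | nil => simp [wsum]
  | cons e t ih =>
    by_cases he : e = c
    · subst he
      simp only [List.foldl_cons, beq_self_eq_true, if_true]
      rw [modify_last pre e x (· + f i) hc, ih]
      simp [wsum]
      constructor
      · ring
      · omega
    · rw [List.foldl_cons, if_neg (show ¬((e == c) = true) from by simp [he]), ih]
      simp [wsum, he]
      omega

lemma B_inner (f : Int → Int) (L : List String) (i : Int) (va vb vc vd : Int) :
    (PySem.List.enumerate L i).foldl
      (fun d (p : Int × String) => if d.contains p.2 then d.modify p.2 0 (· + f p.1) else d)
      (PySem.Dict.mk [("a", va), ("b", vb), ("c", vc), ("d", vd)])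
    = PySem.Dict.mk [("a", va + wsum f L "a" i), ("b", vb + wsum f L "b" i),
        ("c", vc + wsum f L "c" i), ("d", vd + wsum f L "d" i)] := by
  induction L generalizing i va vb vc vd with
  | nil => simp [PySem.List.enumerate_nil, wsum]
  | cons e t ih =>
    rw [PySem.List.enumerate_cons, List.foldl_cons]
    by_cases ha : e = "a"
    · subst ha
      rw [show (if (PySem.Dict.mk [("a", va), ("b", vb), ("c", vc), ("d", vd)]).contains "a" = true then (PySem.Dict.mk [("a", va), ("b", vb), ("c", vc), ("d", vd)]).modify "a" 0 (· + f i) else PySem.Dict.mk [("a", va), ("b", vb), ("c", vc), ("d", vd)]) = PySem.Dict.mk [("a", va + f i), ("b", vb), ("c", vc), ("d", vd)] from by simp [PySem.Dict.contains, PySem.Dict.modify, PySem.Dict.getD, PySem.Dict.get?, PySem.Dict.insert], ih]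
      simp [wsum]; omega
    · by_cases hb : e = "b"
      · subst hb
        rw [show (if (PySem.Dict.mk [("a", va), ("b", vb), ("c", vc), ("d", vd)]).contains "b" = true then (PySem.Dict.mk [("a", va), ("b", vb), ("c", vc), ("d", vd)]).modify "b" 0 (· + f i) else PySem.Dict.mk [("a", va), ("b", vb), ("c", vc), ("d", vd)]) = PySem.Dict.mk [("a", va), ("b", vb + f i), ("c", vc), ("d", vd)] from by simp [PySem.Dict.contains, PySem.Dict.modify, PySem.Dict.getD, PySem.Dict.get?, PySem.Dict.insert], ih]
        simp [wsum]; omega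
      · by_cases hc : e = "c"
        · subst hc
          rw [show (if (PySem.Dict.mk [("a", va), ("b", vb), ("c", vc), ("d", vd)]).contains "c" = true then (PySem.Dict.mk [("a", va), ("b", vb), ("c", vc), ("d", vd)]).modify "c" 0 (· + f i) else PySem.Dict.mk [("a", va), ("b", vb), ("c", vc), ("d", vd)]) = PySem.Dict.mk [("a", va), ("b", vb), ("c", vc + f i), ("d", vd)] from by simp [PySem.Dict.contains, PySem.Dict.modify, PySem.Dict.getD, PySem.Dict.get?, PySem.Dict.insert], ih]
          simp [wsum]; omega
        · by_cases hd : e = "d"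
          · subst hd
            rw [show (if (PySem.Dict.mk [("a", va), ("b", vb), ("c", vc), ("d", vd)]).contains "d" = true then (PySem.Dict.mk [("a", va), ("b", vb), ("c", vc), ("d", vd)]).modify "d" 0 (· + f i) else PySem.Dict.mk [("a", va), ("b", vb), ("c", vc), ("d", vd)]) = PySem.Dict.mk [("a", va), ("b", vb), ("c", vc), ("d", vd + f i)] from by simp [PySem.Dict.contains, PySem.Dict.modify, PySem.Dict.getD, PySem.Dict.get?, PySem.Dict.insert], ih]
            simp [wsum]; omega
          · have hcf : (PySem.Dict.mk [("a", va), ("b", vb), ("c", vc), ("d", vd)]).contains e = false := by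
              simp [PySem.Dict.contains]
              exact ⟨fun h => ha h.symm, fun h => hb h.symm, fun h => hc h.symm, fun h => hd h.symm⟩
            rw [hcf, if_neg (by simp), ih]
            simp [wsum, ha, hb, hc, hd]

lemma idx0 (v1 v2 v3 v4 : Int) :
    List.idxOf? v1 [v1,v2,v3,v4] = some 0 := by
  simp [List.idxOf?, List.findIdx?, List.findIdx?.go]
lemma idx1 (v1 v2 v3 v4 : Int) (h1 : v1 ≠ v2) :
    List.idxOf? v2 [v1,v2,v3,v4] = some 1 := by
  simp [List.idxOf?, List.findIdx?, List.findIdx?.go, h1]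
lemma idx2 (v1 v2 v3 v4 : Int) (h1 : v1 ≠ v3) (h2 : v2 ≠ v3) :
    List.idxOf? v3 [v1,v2,v3,v4] = some 2 := by
  simp [List.idxOf?, List.findIdx?, List.findIdx?.go, h1, h2]
lemma idx3 (v1 v2 v3 v4 : Int) (h1 : v1 ≠ v4) (h2 : v2 ≠ v4) (h3 : v3 ≠ v4) :
    List.idxOf? v4 [v1,v2,v3,v4] = some 3 := by
  simp [List.idxOf?, List.findIdx?, List.findIdx?.go, h1, h2, h3]

lemma winner4 (v1 v2 v3 v4 : Int) :
    (PySem.List.pyGet? ["a","b","c","d"]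
      (((PySem.List.index? [v1,v2,v3,v4] ((PySem.List.max? [v1,v2,v3,v4] (fun v => v)).getD 0)).getD 0 : Nat) : Int)).getD ""
    = (PySem.List.max? ["a","b","c","d"]
        (fun k => (PySem.Dict.mk [("a",v1),("b",v2),("c",v3),("d",v4)]).getD k 0)).getD "" := by
  by_cases h1 : v1 < v2
  · by_cases h2 : v2 < v3
    · by_cases h3 : v3 < v4
      · simp [PySem.List.max?, PySem.Dict.getD, PySem.Dict.get?, PySem.List.pyGet?, PySem.List.pyIdx?, h1, h2, h3,
          idx3 v1 v2 v3 v4 (by omega) (by omega) (by omega)]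
      · simp [PySem.List.max?, PySem.Dict.getD, PySem.Dict.get?, PySem.List.pyGet?, PySem.List.pyIdx?, h1, h2, h3,
          idx2 v1 v2 v3 v4 (by omega) (by omega)]
    · by_cases h3 : v2 < v4
      · simp [PySem.List.max?, PySem.Dict.getD, PySem.Dict.get?, PySem.List.pyGet?, PySem.List.pyIdx?, h1, h2, h3,
          idx3 v1 v2 v3 v4 (by omega) (by omega) (by omega)]
      · simp [PySem.List.max?, PySem.Dict.getD, PySem.Dict.get?, PySem.List.pyGet?, PySem.List.pyIdx?, h1, h2, h3,
          idx1 v1 v2 v3 v4 (by omega)]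
  · by_cases h2 : v1 < v3
    · by_cases h3 : v3 < v4
      · simp [PySem.List.max?, PySem.Dict.getD, PySem.Dict.get?, PySem.List.pyGet?, PySem.List.pyIdx?, h1, h2, h3,
          idx3 v1 v2 v3 v4 (by omega) (by omega) (by omega)]
      · simp [PySem.List.max?, PySem.Dict.getD, PySem.Dict.get?, PySem.List.pyGet?, PySem.List.pyIdx?, h1, h2, h3,
          idx2 v1 v2 v3 v4 (by omega) (by omega)]
    · by_cases h3 : v1 < v4
      · simp [PySem.List.max?, PySem.Dict.getD, PySem.Dict.get?, PySem.List.pyGet?, PySem.List.pyIdx?, h1, h2, h3,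
          idx3 v1 v2 v3 v4 (by omega) (by omega) (by omega)]
      · simp [PySem.List.max?, PySem.Dict.getD, PySem.Dict.get?, PySem.List.pyGet?, PySem.List.pyIdx?, h1, h2, h3,
          idx0 v1 v2 v3 v4]

-- the tally both programs compute for candidate c
def sumc (array : List Int × List String) (c : String) : Int :=
  0 + wsum (fun j => PySem.List.pyGetD array.1 (j + 1) 0) (PySem.List.slice array.2 (some 1) none) c 0

def tally (array : List Int × List String) : PySem.Dict String Int :=
  PySem.Dict.mk [("a", sumc array "a"), ("b", sumc array "b"), ("c", sumc array "c"), ("d", sumc array "d")]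

lemma ins_b (sa : Int) : (PySem.Dict.mk [("a", sa)]).insert "b" 0 = PySem.Dict.mk ([("a", sa)] ++ [("b", (0:Int))]) := by
  simp [PySem.Dict.insert, PySem.Dict.contains]
lemma ins_c (sa sb : Int) : (PySem.Dict.mk [("a", sa), ("b", sb)]).insert "c" 0 = PySem.Dict.mk ([("a", sa), ("b", sb)] ++ [("c", (0:Int))]) := by
  simp [PySem.Dict.insert, PySem.Dict.contains]
lemma ins_d (sa sb sc : Int) : (PySem.Dict.mk [("a", sa), ("b", sb), ("c", sc)]).insert "d" 0 = PySem.Dict.mk ([("a", sa), ("b", sb), ("c", sc)] ++ [("d", (0:Int))]) := by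
  simp [PySem.Dict.insert, PySem.Dict.contains]

lemma A_eq (array : List Int × List String) :
    vidnosna_bilshist array
    = ((tally array).items,
       (PySem.List.pyGet? (tally array).keys
         (((PySem.List.index? (tally array).values ((PySem.List.max? (tally array).values (fun v => v)).getD 0)).getD 0 : Nat) : Int)).getD "") := by
  unfold vidnosna_bilshist
  simp only [list_of_candidates_start, List.foldl_cons, List.foldl_nil]
  rw [show (PySem.Dict.empty : PySem.Dict String Int).insert "a" 0 = PySem.Dict.mk ([] ++ [("a", (0:Int))]) from rfl]
  rw [A_inner (fun j => PySem.List.pyGetD array.1 (j + 1) 0) _ [] "a" 0 0 (by simp)]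
  rw [show ([] : List (String × Int)) ++ [("a", 0 + wsum (fun j => PySem.List.pyGetD array.1 (j + 1) 0) (PySem.List.slice array.2 (some 1) none) "a" 0)] = [("a", sumc array "a")] from rfl]
  rw [ins_b, A_inner (fun j => PySem.List.pyGetD array.1 (j + 1) 0) _ [("a", sumc array "a")] "b" 0 0 (by simp)]
  rw [show [("a", sumc array "a")] ++ [("b", 0 + wsum (fun j => PySem.List.pyGetD array.1 (j + 1) 0) (PySem.List.slice array.2 (some 1) none) "b" 0)] = [("a", sumc array "a"), ("b", sumc array "b")] from rfl]
  rw [ins_c, A_inner (fun j => PySem.List.pyGetD array.1 (j + 1) 0) _ [("a", sumc array "a"), ("b", sumc array "b")] "c" 0 0 (by simp)]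
  rw [show [("a", sumc array "a"), ("b", sumc array "b")] ++ [("c", 0 + wsum (fun j => PySem.List.pyGetD array.1 (j + 1) 0) (PySem.List.slice array.2 (some 1) none) "c" 0)] = [("a", sumc array "a"), ("b", sumc array "b"), ("c", sumc array "c")] from rfl]
  rw [ins_d, A_inner (fun j => PySem.List.pyGetD array.1 (j + 1) 0) _ [("a", sumc array "a"), ("b", sumc array "b"), ("c", sumc array "c")] "d" 0 0 (by simp)]
  rfl

lemma B_eq (array : List Int × List String) :
    vidnosna_bilshist_alt array
    = ((tally array).items,
       (PySem.List.max? (tally array).keys (fun k => (tally array).getD k 0)).getD "") := by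
  unfold vidnosna_bilshist_alt
  simp only [list_of_candidates_start, List.foldl_cons, List.foldl_nil]
  rw [show ((((PySem.Dict.empty : PySem.Dict String Int).insert "a" 0).insert "b" 0).insert "c" 0).insert "d" 0 = PySem.Dict.mk [("a", (0:Int)), ("b", 0), ("c", 0), ("d", 0)] from rfl]
  rw [B_inner (fun j => PySem.List.pyGetD array.1 (j + 1) 0) (PySem.List.slice array.2 (some 1) none) 0 0 0 0 0]
  rfl

-- ===== VERDICT (by name: the statement is the Claim_ definition above) =====
theorem vidnosna_bilshist_spec : Claim_equal_vidnosna_bilshist := by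
  intro array _ _
  unfold Spec_vidnosna_bilshist
  rw [A_eq, B_eq]
  refine congrArg _ ?_
  rw [show (tally array).keys = ["a", "b", "c", "d"] from rfl,
      show (tally array).values = [sumc array "a", sumc array "b", sumc array "c", sumc array "d"] from rfl,
      show tally array = PySem.Dict.mk [("a", sumc array "a"), ("b", sumc array "b"), ("c", sumc array "c"), ("d", sumc array "d")] from rfl]
  exact winner4 (sumc array "a") (sumc array "b") (sumc array "c") (sumc array "d")

@[simp] theorem vidnosna_bilshist_raises : Claim_raises_vidnosna_bilshist := by
  unfold Claim_raises_vidnosna_bilshist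
  exact ⟨by intro a _ hr hp; exact hp.1 hr, by decide⟩
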